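-- pv_equiv track=rewrite | github.com/koka-land/py_base | kpolyakov.spb.ru/gia_11/t_23/6779.py | f
-- ===== SOURCE A (Python) =====
-- def f(st,fin):
--     if st == fin:
--         return 1
--     elif st < fin:
--         return 0
--     elif (st == 9):
--         return 0
--     elif (st == 16):
--         return 0
--     else:
--         return f(st - 1, fin) + f(st - 2, fin) + f(st // 3, fin)
-- ===== SOURCE B (Python) =====
-- def f(st, fin):
--     if st == fin:
--         return 1
--     if st < fin:
--         return 0
--     if st == 9 or st == 16:
--         return 0
--     dp = [1]  # dp[i] = number of decomposition paths from fin+i down to fin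
--     for v in range(fin + 1, st + 1):
--         if v == 9 or v == 16:
--             c = 0
--         else:
--             c = dp[-1] \
--                 + (dp[v - 2 - fin] if v - 2 >= fin else 0) \
--                 + (dp[v // 3 - fin] if v // 3 >= fin else 0)
--         dp.append(c)
--     return dp[-1]
-- ===== Notes on version B (the rewrite author's own statement) =====
-- stated objective: alternative
-- what changed: Replaced A's three-way recursion by a single bottom-up dynamic-programming loop that fills a table of path counts indexed from fin up to st.
import Mathlib
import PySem

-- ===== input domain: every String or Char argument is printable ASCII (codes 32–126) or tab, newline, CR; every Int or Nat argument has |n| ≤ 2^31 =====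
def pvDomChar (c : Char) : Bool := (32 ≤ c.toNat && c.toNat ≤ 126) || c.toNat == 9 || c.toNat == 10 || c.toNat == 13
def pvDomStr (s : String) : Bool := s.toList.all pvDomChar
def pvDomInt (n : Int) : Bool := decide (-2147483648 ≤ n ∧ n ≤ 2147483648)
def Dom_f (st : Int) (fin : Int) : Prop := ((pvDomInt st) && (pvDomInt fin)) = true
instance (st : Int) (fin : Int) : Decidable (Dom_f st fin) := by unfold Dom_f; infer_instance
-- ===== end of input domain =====

-- B replaces A's three-way recursion by a bottom-up DP loop over a table (a different
-- algorithm); equivalence is claimed on Pre_f, the inputs where A's recursion terminates.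

-- ===== PORT A =====
-- fuel-bounded transliteration of A's recursion; the fuel only makes it total.
def fAux : Nat → Int → Int → Int
  | 0, _, _ => 0
  | fuel+1, st, fin =>
    if st = fin then 1
    else if st < fin then 0
    else if st = 9 then 0
    else if st = 16 then 0
    else fAux fuel (st - 1) fin + fAux fuel (st - 2) fin
         + fAux fuel (PySem.Int.floordiv st 3) fin

-- for fin ≥ 0 the fuel (st-fin).toNat+1 reaches every base case (proved below);
-- for fin < 0 A only returns via the four fuel-independent base cases and otherwise
-- recurses forever (outside Pre_f), so fuel 1 suffices wherever A returns.
def fFuel (st : Int) (fin : Int) : Nat := if fin < 0 then 1 else (st - fin).toNat + 1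

def f (st : Int) (fin : Int) : Int := fAux (fFuel st fin) st fin

-- ===== PORT B =====
-- body of B's for-loop: compute the count for v and append it (dp.append(c))
def fStep (fin : Int) (dp : Array Int) (v : Int) : Array Int :=
  let c : Int :=
    if v = 9 ∨ v = 16 then 0
    else dp[dp.size - 1]!  -- dp[-1]
         + (if fin ≤ v - 2 then dp[(v - 2 - fin).toNat]! else 0)
         + (if fin ≤ PySem.Int.floordiv v 3 then dp[(PySem.Int.floordiv v 3 - fin).toNat]! else 0)
  dp.push c

def f_alt (st : Int) (fin : Int) : Int :=
  if st = fin then 1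
  else if st < fin then 0
  else if st = 9 ∨ st = 16 then 0
  else
    let dp := (PySem.List.pyRange (fin + 1) (st + 1) 1).foldl (fStep fin) #[1]
    dp[dp.size - 1]!  -- dp[-1]

-- ===== PRECONDITION & SPEC =====
-- Pre_f excludes exactly the inputs where A's recursion never terminates (Python: RecursionError):
-- fin < 0 with fin < st and st ∉ {9,16}, since the st//3 chain then sticks at 0 or -1 above fin.
def Pre_f (st : Int) (fin : Int) : Prop := 0 ≤ fin ∨ st ≤ fin ∨ st = 9 ∨ st = 16
instance (st : Int) (fin : Int) : Decidable (Pre_f st fin) := by unfold Pre_f; infer_instance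
def pvWitness_f : Int × Int := (20, 3)

def Spec_f (st : Int) (fin : Int) (out : Int) : Prop := out = f_alt st fin
instance (st : Int) (fin : Int) (out : Int) : Decidable (Spec_f st fin out) := by unfold Spec_f; infer_instance

-- ===== CLAIM (what is proved, stated in full; the proofs are below) =====
def Claim_equal_f : Prop := ∀ (st : Int) (fin : Int), Dom_f st fin → Pre_f st fin → Spec_f st fin (f st fin)

-- ===== LEMMAS AND PROOFS =====

lemma fd3_bounds (v : Int) (h : 1 ≤ v) :
    0 ≤ PySem.Int.floordiv v 3 ∧ PySem.Int.floordiv v 3 < v := by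
  rw [PySem.Int.floordiv_eq_ediv_of_pos (by norm_num)]
  omega

lemma fFuel_succ (st fin : Int) : fFuel st fin = (fFuel st fin - 1) + 1 := by
  unfold fFuel; split_ifs <;> omega

-- fuel irrelevance: any fuel above the measure (st-fin).toNat gives the same value
lemma fAux_irrel : ∀ (m : Nat) (st fin : Int) (fuel fuel' : Nat), 0 ≤ fin →
    (st - fin).toNat = m → m < fuel → m < fuel' → fAux fuel st fin = fAux fuel' st fin := by
  intro m
  induction m using Nat.strong_induction_on with
  | _ m ih =>
    intro st fin fuel fuel' hfin hm hf hf'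
    match fuel, fuel' with
    | f1+1, f2+1 =>
      simp only [fAux]
      split_ifs with h1 h2 h3 h4
      · rfl
      · rfl
      · rfl
      · rfl
      · have hst1 : 1 ≤ st := by omega
        obtain ⟨hd0, hdlt⟩ := fd3_bounds st hst1
        have e1 := ih ((st - 1 - fin).toNat) (by omega) (st - 1) fin f1 f2 hfin rfl (by omega) (by omega)
        have e2 := ih ((st - 2 - fin).toNat) (by omega) (st - 2) fin f1 f2 hfin rfl (by omega) (by omega)
        have e3 := ih ((PySem.Int.floordiv st 3 - fin).toNat) (by omega)
          (PySem.Int.floordiv st 3) fin f1 f2 hfin rfl (by omega) (by omega)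
        rw [e1, e2, e3]

lemma f_eq_fAux (st fin : Int) (fuel : Nat) (hfin : 0 ≤ fin) (hf : (st - fin).toNat < fuel) :
    f st fin = fAux fuel st fin := by
  unfold f fFuel
  rw [if_neg (by omega)]
  exact fAux_irrel ((st - fin).toNat) st fin _ fuel hfin rfl (by omega) hf

lemma f_of_eq (st fin : Int) (h : st = fin) : f st fin = 1 := by
  unfold f
  rw [fFuel_succ]
  simp only [fAux]
  rw [if_pos h]

lemma f_of_lt (st fin : Int) (h : st < fin) : f st fin = 0 := by
  unfold f
  rw [fFuel_succ]
  simp only [fAux]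
  rw [if_neg (by omega), if_pos h]

lemma f_of_nine (st fin : Int) (h : st = 9) (hne : st ≠ fin) : f st fin = 0 := by
  unfold f
  rw [fFuel_succ]
  simp only [fAux]
  rw [if_neg hne]
  by_cases hlt : st < fin
  · rw [if_pos hlt]
  · rw [if_neg hlt, if_pos h]

lemma f_of_sixteen (st fin : Int) (h : st = 16) (hne : st ≠ fin) : f st fin = 0 := by
  unfold f
  rw [fFuel_succ]
  simp only [fAux]
  rw [if_neg hne]
  by_cases hlt : st < fin
  · rw [if_pos hlt]
  · rw [if_neg hlt, if_neg (by omega), if_pos h]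

lemma f_step (st fin : Int) (hfin : 0 ≤ fin) (h2 : fin < st) (h9 : st ≠ 9) (h16 : st ≠ 16) :
    f st fin = f (st - 1) fin + f (st - 2) fin + f (PySem.Int.floordiv st 3) fin := by
  have hst1 : 1 ≤ st := by omega
  obtain ⟨hd0, hdlt⟩ := fd3_bounds st hst1
  rw [f_eq_fAux st fin ((st - fin).toNat + 1) hfin (by omega)]
  simp only [fAux]
  rw [if_neg (by omega), if_neg (by omega), if_neg h9, if_neg h16]
  rw [← f_eq_fAux (st - 1) fin _ hfin (by omega),
      ← f_eq_fAux (st - 2) fin _ hfin (by omega),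
      ← f_eq_fAux (PySem.Int.floordiv st 3) fin _ hfin (by omega)]

-- the DP invariant: after processing fin+1 .. fin+k, the table holds f's values at fin..fin+k
lemma dp_invariant (fin : Int) (hfin : 0 ≤ fin) : ∀ (k : Nat),
    ((PySem.List.pyRange (fin + 1) (fin + 1 + k) 1).foldl (fStep fin) #[1]).size = k + 1 ∧
    ∀ i : Nat, i ≤ k →
      ((PySem.List.pyRange (fin + 1) (fin + 1 + k) 1).foldl (fStep fin) #[1])[i]! =
        f (fin + i) fin := by
  intro k
  induction k with
  | zero =>
    rw [PySem.List.pyRange_one_eq_nil (by omega)]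
    refine ⟨rfl, ?_⟩
    intro i hi
    interval_cases i
    simp only [List.foldl_nil]
    rw [show ((#[1] : Array Int)[0]! = (1:Int)) from rfl,
        show fin + ((0:Nat):Int) = fin by omega, f_of_eq fin fin rfl]
  | succ k ih =>
    obtain ⟨ihsize, ihval⟩ := ih
    have hrange : PySem.List.pyRange (fin + 1) (fin + 1 + ((k+1 : Nat) : Int)) 1 =
        PySem.List.pyRange (fin + 1) (fin + 1 + k) 1 ++ [fin + 1 + k] := by
      rw [show fin + 1 + ((k+1 : Nat) : Int) = (fin + 1 + k) + 1 by push_cast; ring]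
      exact PySem.List.pyRange_one_succ_right (by omega)
    rw [hrange, List.foldl_append, List.foldl_cons, List.foldl_nil]
    set d := (PySem.List.pyRange (fin + 1) (fin + 1 + (k : Int)) 1).foldl (fStep fin) #[1] with hd
    have hidx : d.size = k + 1 := ihsize
    have hold : ∀ (c : Int) (i : Nat), i ≤ k → (d.push c)[i]! = d[i]! := by
      intro c i hik
      rw [getElem!_pos (d.push c) i (by simp [hidx]; omega),
          getElem!_pos d i (by omega), Array.getElem_push_lt]
    have hkey : ∀ (c : Int), (d.push c)[k+1]! = c := by
      intro c
      rw [show (k+1 : Nat) = d.size from hidx.symm,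
          getElem!_pos (d.push c) d.size (by simp), Array.getElem_push_eq]
    unfold fStep
    refine ⟨by simp [Array.size_push, ihsize], ?_⟩
    intro i hi
    by_cases hik : i ≤ k
    · -- old entries are unchanged by push
      exact (hold _ i hik).trans (ihval i hik)
    · -- the new entry: i = k+1, value for v = fin+1+k
      have hik1 : i = k + 1 := by omega
      subst hik1
      refine (hkey _).trans ?_
      have hv : fin + ((k+1 : Nat) : Int) = fin + 1 + (k : Int) := by push_cast; ring
      rw [← hv]
      set v : Int := fin + ((k+1 : Nat) : Int) with hvdef
      have hvgt : fin < v := by omega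
      have hvne : v ≠ fin := by omega
      by_cases h916 : v = 9 ∨ v = 16
      · rw [if_pos h916]
        rcases h916 with h9 | h16
        · rw [f_of_nine v fin h9 hvne]
        · rw [f_of_sixteen v fin h16 hvne]
      · push Not at h916
        rw [if_neg (by tauto), f_step v fin hfin hvgt h916.1 h916.2]
        obtain ⟨hd0, hdlt⟩ := fd3_bounds v (by omega)
        congr 1
        · congr 1
          · -- dp[-1] is the entry for v-1 = fin+k
            rw [show d.size - 1 = k by omega, ihval k (by omega),
                show fin + (k : Int) = v - 1 by omega]
          · -- entry for v-2, or 0 when v-2 < fin (where f is 0 too)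
            by_cases h2 : fin ≤ v - 2
            · rw [if_pos h2, ihval ((v - 2 - fin).toNat) (by omega),
                  show fin + ((v - 2 - fin).toNat : Int) = v - 2 by omega]
            · rw [if_neg h2, f_of_lt (v - 2) fin (by omega)]
        · -- entry for v//3, or 0 when v//3 < fin (where f is 0 too)
          by_cases h3 : fin ≤ PySem.Int.floordiv v 3
          · rw [if_pos h3, ihval ((PySem.Int.floordiv v 3 - fin).toNat) (by omega),
                show fin + ((PySem.Int.floordiv v 3 - fin).toNat : Int) = PySem.Int.floordiv v 3 by omega]
          · rw [if_neg h3, f_of_lt _ fin (by omega)]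

-- ===== VERDICT (by name: the statement is the Claim_ definition above) =====
theorem f_spec : Claim_equal_f := by
  intro st fin _ hpre
  unfold Spec_f f_alt
  by_cases h1 : st = fin
  · rw [if_pos h1, f_of_eq st fin h1]
  · rw [if_neg h1]
    by_cases h2 : st < fin
    · rw [if_pos h2, f_of_lt st fin h2]
    · rw [if_neg h2]
      by_cases h3 : st = 9 ∨ st = 16
      · rw [if_pos h3]
        rcases h3 with h9 | h16
        · rw [f_of_nine st fin h9 h1]
        · rw [f_of_sixteen st fin h16 h1]
      · push Not at h3
        rw [if_neg (by tauto)]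
        have hfin : 0 ≤ fin := by
          rcases hpre with h | h | h | h
          · exact h
          · omega
          · exact absurd h h3.1
          · exact absurd h h3.2
        obtain ⟨hsize, hval⟩ := dp_invariant fin hfin ((st - fin).toNat)
        have hend : st + 1 = fin + 1 + (((st - fin).toNat : Nat) : Int) := by omega
        simp only
        rw [hend, hsize, show (st - fin).toNat + 1 - 1 = (st - fin).toNat from rfl,
            hval ((st - fin).toNat) (le_refl _),
            show fin + (((st - fin).toNat : Nat) : Int) = st by omega]
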